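-- pv_equiv track=rewrite | github.com/vanshikatyagii/capstone | capstone_backend/v2_pipeline.py | _build_entity_header
-- ===== SOURCE A (Python) =====
-- PRIORITY_CLAUSES = [
--     "Parties", "Effective Date", "Governing Law",
--     "Termination for Convenience", "Confidentiality",
--     "Payment Terms", "Limitation of Liability",
--     "Indemnification", "IP Ownership Assignment",
-- ]
--
-- def _build_entity_header(entities_per_clause: dict) -> str:
--     parts   = []
--     ordered = [k for k in PRIORITY_CLAUSES if k in entities_per_clause]
--     rest    = [k for k in entities_per_clause if k not in PRIORITY_CLAUSES]
--     for k in ordered + rest: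
--         ents = entities_per_clause.get(k, [])
--         if ents:
--             vals = ", ".join(e["text"] for e in ents)
--             parts.append(f"{k}: {vals}")
--     return ". ".join(parts)
-- ===== SOURCE B (Python) =====
-- PRIORITY_CLAUSES = [
--     "Parties", "Effective Date", "Governing Law",
--     "Termination for Convenience", "Confidentiality",
--     "Payment Terms", "Limitation of Liability",
--     "Indemnification", "IP Ownership Assignment",
-- ]
--
-- def _build_entity_header(entities_per_clause: dict) -> str:
--     # Bucket sort by priority rank in ONE pass over the dict items:
--     # no membership rescans of PRIORITY_CLAUSES and no .get() lookups.
--     rank = {name: i for i, name in enumerate(PRIORITY_CLAUSES)}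
--     sentinel = len(PRIORITY_CLAUSES)
--     buckets = [[] for _ in range(sentinel + 1)]
--     for k, ents in entities_per_clause.items():
--         if ents:
--             vals = ", ".join(e["text"] for e in ents)
--             buckets[rank.get(k, sentinel)].append(f"{k}: {vals}")
--     return ". ".join(p for bucket in buckets for p in bucket)
-- ===== Notes on version B (the rewrite author's own statement) =====
-- stated objective: alternative
-- what changed: A makes two filtering passes (priority keys by scanning PRIORITY_CLAUSES with membership tests, then the remaining keys) and re-looks every key up with .get(); B precomputes a name-to-rank table and does one bucket-sort pass over the dict items, appending each formatted clause to its rank bucket and flattening the buckets.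
import Mathlib
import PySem

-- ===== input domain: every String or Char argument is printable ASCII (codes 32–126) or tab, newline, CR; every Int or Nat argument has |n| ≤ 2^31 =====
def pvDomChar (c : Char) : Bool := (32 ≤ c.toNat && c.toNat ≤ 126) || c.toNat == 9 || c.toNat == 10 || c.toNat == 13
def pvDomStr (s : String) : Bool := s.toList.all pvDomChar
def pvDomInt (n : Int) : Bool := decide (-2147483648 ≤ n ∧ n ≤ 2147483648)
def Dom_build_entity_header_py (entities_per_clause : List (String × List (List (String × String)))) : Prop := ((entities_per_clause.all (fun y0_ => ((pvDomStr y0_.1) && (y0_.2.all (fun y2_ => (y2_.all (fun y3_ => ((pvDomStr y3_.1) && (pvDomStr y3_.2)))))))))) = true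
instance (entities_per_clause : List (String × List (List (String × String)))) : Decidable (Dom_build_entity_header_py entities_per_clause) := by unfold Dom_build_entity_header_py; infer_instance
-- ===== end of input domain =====

-- B replaces A's two membership-scan passes over the keys with a one-pass bucket sort by priority rank;
-- objective: alternative (single pass over the dict items, no per-key lookups / membership rescans).

-- ===== PORT A =====
def pvPriority : List String :=
  ["Parties", "Effective Date", "Governing Law",
   "Termination for Convenience", "Confidentiality",
   "Payment Terms", "Limitation of Liability",
   "Indemnification", "IP Ownership Assignment"]

-- f"{k}: {vals}" with vals = ", ".join(e["text"] for e in ents); both Pythons compute this same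
-- expression per item.  e["text"] is a dict lookup; the .getD "" default is never used under Pre_.
def pvFmt (k : String) (ents : List (List (String × String))) : String :=
  k ++ ": " ++ PySem.Str.join ", " (ents.map (fun e => ((PySem.Dict.ofList e).get? "text").getD ""))

def build_entity_header_py (entities_per_clause : List (String × List (List (String × String)))) : String :=
  let d := PySem.Dict.ofList entities_per_clause
  let ordered := pvPriority.filter (fun k => d.contains k)
  let rest := d.keys.filter (fun k => !(pvPriority.contains k))
  let parts := (ordered ++ rest).foldl (fun parts k =>
      let ents := d.getD k []
      if ents.isEmpty then parts else parts ++ [pvFmt k ents]) []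
  PySem.Str.join ". " parts

-- ===== PORT B =====
def build_entity_header_py_alt (entities_per_clause : List (String × List (List (String × String)))) : String :=
  let rank := (PySem.List.enumerate pvPriority).foldl (fun d p => d.insert p.2 p.1) (PySem.Dict.empty)
  let sentinel : Int := (pvPriority.length : Int)
  let buckets0 : List (List String) := (PySem.List.pyRange 0 (sentinel + 1) 1).map (fun _ => [])
  let buckets := (PySem.Dict.ofList entities_per_clause).items.foldl (fun bs kv =>
      if kv.2.isEmpty then bs
      else
        let r := rank.getD kv.1 sentinel
        PySem.List.pySetD bs r (PySem.List.pyGetD bs r [] ++ [pvFmt kv.1 kv.2])) buckets0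
  PySem.Str.join ". " buckets.flatten

-- ===== PRECONDITION & SPEC =====
-- Pre_ excludes exactly the inputs where A raises KeyError: an entity dict without a "text" key
-- that survives into the argument dict (duplicate keys overwrite, as in Python).
def Pre_build_entity_header_py (entities_per_clause : List (String × List (List (String × String)))) : Prop :=
  ∀ kv ∈ (PySem.Dict.ofList entities_per_clause).items, ∀ e ∈ kv.2, "text" ∈ e.map (·.1)
instance (entities_per_clause : List (String × List (List (String × String)))) : Decidable (Pre_build_entity_header_py entities_per_clause) := by unfold Pre_build_entity_header_py; infer_instance

def pvWitness_build_entity_header_py : (List (String × List (List (String × String)))) :=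
  [("Other Clause", [[("text", "Acme Corp")], [("text", "Beta LLC")]]), ("Parties", [[("text", "Acme")]]), ("Scope", [])]

def Spec_build_entity_header_py (entities_per_clause : List (String × List (List (String × String)))) (out : String) : Prop := out = build_entity_header_py_alt entities_per_clause
instance (entities_per_clause : List (String × List (List (String × String)))) (out : String) : Decidable (Spec_build_entity_header_py entities_per_clause out) := by unfold Spec_build_entity_header_py; infer_instance

-- ===== CLAIM (what is proved, stated in full; the proofs are below) =====
def Claim_equal_build_entity_header_py : Prop := ∀ (entities_per_clause : List (String × List (List (String × String)))), Dom_build_entity_header_py entities_per_clause → Pre_build_entity_header_py entities_per_clause → Spec_build_entity_header_py entities_per_clause (build_entity_header_py entities_per_clause)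

-- ===== LEMMAS AND PROOFS =====

-- the rank of a key: its index in pvPriority, 9 (= the sentinel) if absent
def pvRnk (k : String) : Nat :=
  if k = "Parties" then 0 else if k = "Effective Date" then 1 else if k = "Governing Law" then 2
  else if k = "Termination for Convenience" then 3 else if k = "Confidentiality" then 4
  else if k = "Payment Terms" then 5 else if k = "Limitation of Liability" then 6
  else if k = "Indemnification" then 7 else if k = "IP Ownership Assignment" then 8 else 9

theorem pvRnk_le (k : String) : pvRnk k ≤ 9 := by
  unfold pvRnk; split_ifs <;> omega

theorem pvRankDict_eq : ((PySem.List.enumerate pvPriority).foldl (fun d p => d.insert p.2 p.1)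
      (PySem.Dict.empty : PySem.Dict String Int)) = PySem.Dict.mk
      [("Parties",0),("Effective Date",1),("Governing Law",2),("Termination for Convenience",3),
       ("Confidentiality",4),("Payment Terms",5),("Limitation of Liability",6),
       ("Indemnification",7),("IP Ownership Assignment",8)] := by
  rfl

set_option maxHeartbeats 1000000 in
theorem pvRank_getD (k : String) :
    ((PySem.List.enumerate pvPriority).foldl (fun d p => d.insert p.2 p.1)
      (PySem.Dict.empty : PySem.Dict String Int)).getD k (pvPriority.length : Int) = (pvRnk k : Nat) := by
  rw [pvRankDict_eq]
  have hlen : ((pvPriority.length : Nat) : Int) = 9 := by rfl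
  rw [hlen]
  by_cases e1 : k = "Parties"; · subst e1; decide
  by_cases e2 : k = "Effective Date"; · subst e2; decide
  by_cases e3 : k = "Governing Law"; · subst e3; decide
  by_cases e4 : k = "Termination for Convenience"; · subst e4; decide
  by_cases e5 : k = "Confidentiality"; · subst e5; decide
  by_cases e6 : k = "Payment Terms"; · subst e6; decide
  by_cases e7 : k = "Limitation of Liability"; · subst e7; decide
  by_cases e8 : k = "Indemnification"; · subst e8; decide
  by_cases e9 : k = "IP Ownership Assignment"; · subst e9; decide
  simp only [PySem.Dict.getD_eq_get?_getD, PySem.Dict.get?_mk_cons, pvRnk,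
    beq_iff_eq, if_neg (Ne.symm e1), if_neg (Ne.symm e2), if_neg (Ne.symm e3), if_neg (Ne.symm e4),
    if_neg (Ne.symm e5), if_neg (Ne.symm e6), if_neg (Ne.symm e7), if_neg (Ne.symm e8),
    if_neg (Ne.symm e9), if_neg e1, if_neg e2, if_neg e3, if_neg e4, if_neg e5, if_neg e6,
    if_neg e7, if_neg e8, if_neg e9]
  rfl

set_option maxHeartbeats 2000000 in
theorem pvRnk_eq_iff (k : String) (j : Nat) (hj : j < 9) :
    (pvRnk k == j) = (k == pvPriority.getD j "") := by
  unfold pvRnk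
  split_ifs <;> interval_cases j <;> simp_all [pvPriority]

set_option maxHeartbeats 1000000 in
theorem pvRnk_nine_iff (k : String) :
    (pvRnk k == 9) = !(pvPriority.contains k) := by
  unfold pvRnk
  split_ifs <;> simp_all [pvPriority]

-- bucket j of B's single pass, as a filter over the item list
def pvBpart (l : List (String × List (List (String × String)))) (j : Nat) : List String :=
  (l.filter (fun kv => !kv.2.isEmpty && pvRnk kv.1 == j)).map (fun kv => pvFmt kv.1 kv.2)

theorem pvSetRange {α : Type} (f : Nat → α) (n i : Nat) (v : α) :
    ((List.range n).map f).set i v = (List.range n).map (fun j => if j = i then v else f j) := by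
  apply List.ext_getElem (by simp)
  intro m h1 h2
  simp only [List.getElem_set, List.getElem_map, List.getElem_range] at *
  split_ifs with hA hB hC
  · rfl
  · omega
  · omega
  · rfl

-- invariant of B's bucket loop
theorem pvBfold (l : List (String × List (List (String × String)))) (f : Nat → List String) :
    l.foldl (fun bs kv =>
        if kv.2.isEmpty then bs
        else PySem.List.pySetD bs ((pvRnk kv.1 : Nat) : Int)
          (PySem.List.pyGetD bs ((pvRnk kv.1 : Nat) : Int) [] ++ [pvFmt kv.1 kv.2]))
      ((List.range 10).map f)
    = (List.range 10).map (fun j => f j ++ pvBpart l j) := by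
  induction l generalizing f with
  | nil => simp [pvBpart]
  | cons kv l ih =>
    rw [List.foldl_cons]
    by_cases he : kv.2.isEmpty
    · rw [if_pos he, ih f]
      apply List.map_congr_left
      intro j hj
      simp [pvBpart, he]
    · rw [if_neg he]
      have hr : pvRnk kv.1 < 10 := Nat.lt_succ_of_le (pvRnk_le kv.1)
      have hget : PySem.List.pyGetD ((List.range 10).map f) ((pvRnk kv.1 : Nat) : Int) [] = f (pvRnk kv.1) := by
        rw [PySem.List.pyGetD_natCast]
        simp [List.getD, hr]
      rw [hget, PySem.List.pySetD_natCast, pvSetRange f 10 (pvRnk kv.1)]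
      rw [ih]
      apply List.map_congr_left
      intro j hj
      simp only [List.mem_range] at hj
      by_cases hjr : j = pvRnk kv.1
      · subst hjr
        simp [pvBpart, he, List.append_assoc]
      · have hne : (pvRnk kv.1 == j) = false := by simp [Ne.symm hjr]
        simp [pvBpart, he, hne, if_neg hjr]

-- a Nodup key list keeps at most one copy of any key
theorem pvFilterSingle (K : List String) (hnd : K.Nodup) (q : String → Bool) (p : String) :
    K.filter (fun k => q k && k == p) = if p ∈ K ∧ q p = true then [p] else [] := by
  induction K with
  | nil => simp
  | cons a K ih =>
    rcases List.nodup_cons.mp hnd with ⟨ha, hK⟩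
    rw [List.filter_cons]
    by_cases hap : a = p
    · subst hap
      have hnil : K.filter (fun k => q k && k == a) = [] := by
        apply List.filter_eq_nil_iff.mpr
        intro x hx
        simp only [Bool.and_eq_true, beq_iff_eq, not_and]
        intro _ hxa; exact ha (hxa ▸ hx)
      by_cases hq : q a = true <;> simp [hq, hnil]
    · have hfa : (q a && a == p) = false := by simp [hap]
      rw [hfa, ih hK]
      by_cases hm : p ∈ K ∧ q p = true <;> simp [hm]
      · intro h; cases h <;> simp_all

theorem pvFilterMapFlat {α β : Type} (xs : List α) (q : α → Bool) (f : α → β) :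
    (xs.filter q).map f = xs.flatMap (fun x => if q x then [f x] else []) := by
  induction xs with
  | nil => simp
  | cons a xs ih =>
    rw [List.filter_cons, List.flatMap_cons, ← ih]
    by_cases h : q a = true <;> simp [h]

theorem pvHelper (K : List String) (hnd : K.Nodup) (q : String → Bool) (f : String → String) (pj : String) :
    (K.filter (fun k => q k && k == pj)).map f = if q pj && decide (pj ∈ K) then [f pj] else [] := by
  rw [pvFilterSingle K hnd q pj]
  by_cases hm : pj ∈ K <;> by_cases hq : q pj = true <;> simp [hm, hq]

-- ===== VERDICT (by name: the statement is the Claim_ definition above) =====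
set_option maxHeartbeats 4000000 in
theorem build_entity_header_py_spec : Claim_equal_build_entity_header_py := by
  intro eps _hdom _hpre
  unfold Spec_build_entity_header_py build_entity_header_py build_entity_header_py_alt
  dsimp only
  set d := PySem.Dict.ofList eps with hd
  set K := d.keys with hK
  have hnd : K.Nodup := PySem.Dict.nodup_keys_ofList eps
  have hitems : d.items = K.map (fun k => (k, d.getD k [])) := PySem.Dict.items_eq_map_keys d hnd []
  set p : String → Bool := fun k => !(d.getD k []).isEmpty with hp
  set f : String → String := fun k => pvFmt k (d.getD k []) with hf
  -- A side: the append-loop is a filter+map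
  have hstepA : (fun (parts : List String) k =>
      let ents := d.getD k []
      if ents.isEmpty then parts else parts ++ [pvFmt k ents]) =
      (fun (parts : List String) k => if p k = true then parts ++ [f k] else parts) := by
    funext parts k
    by_cases h : (d.getD k []).isEmpty <;> simp [hp, hf, h]
  rw [hstepA, PySem.List.foldl_append_if, List.nil_append, List.filter_append, List.map_append,
      List.filter_filter, List.filter_filter]
  -- B side: normalise the initial buckets and the loop body, then apply the invariant
  have hb0 : (PySem.List.pyRange 0 ((pvPriority.length : Nat) + 1 : Int) 1).map
      (fun _ => ([] : List String)) = (List.range 10).map (fun _ => ([] : List String)) := by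
    rw [PySem.List.pyRange_one]
    simp [List.map_map]
    rfl
  have hstepB : (fun (bs : List (List String)) (kv : String × List (List (String × String))) =>
      if kv.2.isEmpty then bs
      else
        let r := ((PySem.List.enumerate pvPriority).foldl (fun d p => d.insert p.2 p.1)
          (PySem.Dict.empty : PySem.Dict String Int)).getD kv.1 (pvPriority.length : Int)
        PySem.List.pySetD bs r (PySem.List.pyGetD bs r [] ++ [pvFmt kv.1 kv.2])) =
      (fun bs kv =>
        if kv.2.isEmpty then bs
        else PySem.List.pySetD bs ((pvRnk kv.1 : Nat) : Int)
          (PySem.List.pyGetD bs ((pvRnk kv.1 : Nat) : Int) [] ++ [pvFmt kv.1 kv.2])) := by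
    funext bs kv
    by_cases h : kv.2.isEmpty <;> simp only [h, if_true, if_false, Bool.false_eq_true, pvRank_getD]
  rw [hb0, hstepB, pvBfold]
  simp only [List.nil_append]
  -- both sides are joins: reduce to equality of the part lists
  congr 1
  -- RHS buckets as filters over the key list
  have hBp : ∀ j : Nat, pvBpart d.items j = (K.filter (fun k => p k && (pvRnk k == j))).map f := by
    intro j
    rw [pvBpart, hitems, List.filter_map, List.map_map]
    rfl
  -- per-priority bucket lemmas
  have hcont : ∀ pj : String, d.contains pj = decide (pj ∈ K) := by
    intro pj; rw [PySem.Dict.contains_eq_decide_mem_keys]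
  have hj : ∀ (j : Nat), j < 9 → (K.filter (fun k => p k && (pvRnk k == j))).map f =
      if p (pvPriority.getD j "") && d.contains (pvPriority.getD j "") then [f (pvPriority.getD j "")] else [] := by
    intro j hjlt
    have hpred : (fun k => p k && (pvRnk k == j)) = (fun k => p k && (k == pvPriority.getD j "")) := by
      funext k; rw [pvRnk_eq_iff k j hjlt]
    rw [hpred, pvHelper K hnd p f (pvPriority.getD j ""), hcont]
  have h9 : (K.filter (fun k => p k && (pvRnk k == 9))).map f =
      (K.filter (fun k => p k && !pvPriority.contains k)).map f := by
    have hpred : (fun k => p k && (pvRnk k == 9)) = (fun k => p k && !pvPriority.contains k) := by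
      funext k; rw [pvRnk_nine_iff]
    rw [hpred]
  -- expand both nine-element literals and close
  rw [pvFilterMapFlat]
  simp only [List.range_succ, List.map_append, List.map_cons, List.map_nil, List.flatten_append,
    List.flatten_cons, List.flatten_nil, List.range_zero, hBp]
  rw [hj 0 (by omega), hj 1 (by omega), hj 2 (by omega), hj 3 (by omega), hj 4 (by omega),
      hj 5 (by omega), hj 6 (by omega), hj 7 (by omega), hj 8 (by omega), h9]
  simp only [pvPriority, List.getD, List.flatMap_cons, List.flatMap_nil, List.getElem?_cons_zero,
    List.getElem?_cons_succ, Option.getD_some]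
  simp [List.append_assoc]
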